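-- pv_equiv track=rewrite | github.com/KazukiNoSuzaku/Leetcode | Python/1300_Sum_of_Mutated_Array_Closest_to_Target.py | findBestValue
-- ===== SOURCE A (Python) =====
-- def findBestValue(arr, target):
--     """
--     :type arr: List[int]
--     :type target: int
--     :rtype: int
--     """
--     arr.sort()
--     n = len(arr)
--     prefix = [0] * (n + 1)
--     for i in range(n):
--         prefix[i + 1] = prefix[i] + arr[i]
--
--     def compute_sum(value):
--         import bisect
--         idx = bisect.bisect_right(arr, value)
--         return prefix[idx] + value * (n - idx)
--
--     lo, hi = 0, max(arr)
--     while lo < hi: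
--         mid = (lo + hi) // 2
--         if compute_sum(mid) < target:
--             lo = mid + 1
--         else:
--             hi = mid
--
--     # Check lo-1 and lo to find closest
--     if lo > 0 and abs(compute_sum(lo - 1) - target) <= abs(compute_sum(lo) - target):
--         return lo - 1
--     return lo
-- ===== SOURCE B (Python) =====
-- def findBestValue(arr, target):
--     """
--     :type arr: List[int]
--     :type target: int
--     :rtype: int
--     """
--     arr.sort()
--     n = len(arr)
--     mx = arr[-1]
--
--     def capped_sum(value):
--         return sum(min(a, value) for a in arr)
--
--     # One pass over the sorted array: find the first segment where the capped
--     # sum can reach target; there the sum is linear in the cap value.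
--     prefix = 0
--     vstar = max(mx, 0)
--     for i in range(n):
--         rem = n - i
--         if prefix + arr[i] * rem >= target:
--             v = -((prefix - target) // rem)  # ceil((target - prefix) / rem)
--             vstar = max(v, 0)
--             break
--         prefix += arr[i]
--
--     if vstar > 0 and abs(capped_sum(vstar - 1) - target) <= abs(capped_sum(vstar) - target):
--         return vstar - 1
--     return vstar
-- ===== Notes on version B (the rewrite author's own statement) =====
-- stated objective: alternative
-- what changed: Replaces A's binary search over the value range (with bisect-based sum evaluation at each probe) by a single linear scan of the sorted array that locates the crossing segment and solves for the optimal cap by one ceiling division.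
import Mathlib
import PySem

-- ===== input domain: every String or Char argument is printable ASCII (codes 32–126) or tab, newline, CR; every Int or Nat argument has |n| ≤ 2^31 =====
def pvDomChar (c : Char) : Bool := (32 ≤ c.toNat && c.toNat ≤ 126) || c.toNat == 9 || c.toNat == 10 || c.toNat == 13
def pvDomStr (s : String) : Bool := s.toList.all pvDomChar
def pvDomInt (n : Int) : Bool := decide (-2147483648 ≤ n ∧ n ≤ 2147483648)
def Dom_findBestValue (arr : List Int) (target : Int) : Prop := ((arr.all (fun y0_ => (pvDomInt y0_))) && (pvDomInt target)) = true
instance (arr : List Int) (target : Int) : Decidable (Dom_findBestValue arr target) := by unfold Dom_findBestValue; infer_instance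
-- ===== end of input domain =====

-- B replaces A's binary search over the value range by one linear scan of the sorted
-- array that locates the crossing segment and solves for the cap by a ceiling division
-- (objective: alternative).  Both A and B sort `arr` in place; the equivalence proved
-- here is about the return value.

-- ===== PORT A =====
-- prefix table: prefix = [0]*(n+1); for i in range(n): prefix[i+1] = prefix[i] + arr[i]
def pvPrefixes (l : List Int) : List Int :=
  (l.foldl (fun (p : List Int × Int) a => (p.1 ++ [p.2 + a], p.2 + a)) ([0], 0)).1

-- compute_sum(value); bisect.bisect_right is PySem.List.bisectRight
def computeSum (l : List Int) (v : Int) : Int :=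
  let idx := PySem.List.bisectRight l v
  PySem.List.pyGetD (pvPrefixes l) (idx : Int) 0 + v * ((l.length : Int) - (idx : Int))

-- while lo < hi: mid = (lo+hi)//2; if compute_sum(mid) < target: lo = mid+1 else hi = mid
-- (the single use of mid is inlined; the fuel argument only makes the while loop total:
-- hi - lo shrinks every iteration, so fuel (hi - lo).toNat never runs out)
def bsearchA (cs : Int → Int) (target : Int) : Nat → Int → Int → Int
  | 0, lo, _ => lo
  | fuel + 1, lo, hi =>
    if lo < hi then
      if cs (PySem.Int.floordiv (lo + hi) 2) < target then
        bsearchA cs target fuel (PySem.Int.floordiv (lo + hi) 2 + 1) hi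
      else
        bsearchA cs target fuel lo (PySem.Int.floordiv (lo + hi) 2)
    else lo

def findBestValue (arr : List Int) (target : Int) : Int :=
  let l := PySem.List.sorted arr (fun y => y)
  -- max(arr): raises ValueError on [], excluded by Pre_
  let mx := (PySem.List.max? l (fun y => y)).getD 0
  let lo := bsearchA (computeSum l) target (mx - 0).toNat 0 mx
  if lo > 0 ∧ |computeSum l (lo - 1) - target| ≤ |computeSum l lo - target| then lo - 1
  else lo

-- ===== PORT B =====
-- capped_sum(value) = sum(min(a, value) for a in arr)
def cappedSum (l : List Int) (v : Int) : Int := (l.map (fun a => min a v)).sum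

-- the scan: for i in range(n): if prefix + arr[i]*(n-i) >= target: break with the
-- ceiling division; else prefix += arr[i]
def scanSeg (target dflt : Int) : List Int → Int → Int
  | [], _ => dflt
  | a :: t, p =>
    if target ≤ p + a * ((t.length : Int) + 1) then
      max (-(PySem.Int.floordiv (p - target) ((t.length : Int) + 1))) 0
    else scanSeg target dflt t (p + a)

def findBestValue_alt (arr : List Int) (target : Int) : Int :=
  let l := PySem.List.sorted arr (fun y => y)
  -- arr[-1]: raises IndexError on [], excluded by Pre_
  let mx := (PySem.List.pyGet? l (-1)).getD 0
  let vstar := scanSeg target (max mx 0) l 0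
  if vstar > 0 ∧ |cappedSum l (vstar - 1) - target| ≤ |cappedSum l vstar - target| then vstar - 1
  else vstar

-- ===== PRECONDITION & SPEC =====
-- A raises ValueError (max() of an empty sequence) on arr = []; excluded.
def Pre_findBestValue (arr : List Int) (target : Int) : Prop := arr ≠ []
instance (arr : List Int) (target : Int) : Decidable (Pre_findBestValue arr target) := by
  unfold Pre_findBestValue; infer_instance

def pvWitness_findBestValue : List Int × Int := ([1, 4, 2], 5)

def Spec_findBestValue (arr : List Int) (target : Int) (out : Int) : Prop := out = findBestValue_alt arr target
instance (arr : List Int) (target : Int) (out : Int) : Decidable (Spec_findBestValue arr target out) := by unfold Spec_findBestValue; infer_instance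

-- ===== CLAIM (what is proved, stated in full; the proofs are below) =====
def Claim_equal_findBestValue : Prop := ∀ (arr : List Int) (target : Int), Dom_findBestValue arr target → Pre_findBestValue arr target → Spec_findBestValue arr target (findBestValue arr target)

-- ===== LEMMAS AND PROOFS =====

-- the common characterisation: r is the value A's search and B's scan both compute
def GoodR (l : List Int) (target mx r : Int) : Prop :=
  0 ≤ r ∧ r ≤ mx ∧ (∀ w, 0 ≤ w → w < r → cappedSum l w < target) ∧
    (target ≤ cappedSum l r ∨ r = mx)

theorem goodR_unique {l : List Int} {target mx r₁ r₂ : Int}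
    (h₁ : GoodR l target mx r₁) (h₂ : GoodR l target mx r₂) : r₁ = r₂ := by
  obtain ⟨h10, h1m, h1lt, h1hi⟩ := h₁
  obtain ⟨h20, h2m, h2lt, h2hi⟩ := h₂
  rcases lt_trichotomy r₁ r₂ with h | h | h
  · have := h2lt r₁ h10 h
    rcases h1hi with h' | h' <;> omega
  · exact h
  · have := h1lt r₂ h20 h
    rcases h2hi with h' | h' <;> omega

theorem cappedSum_mono {l : List Int} {v w : Int} (h : v ≤ w) :
    cappedSum l v ≤ cappedSum l w := by
  induction l with
  | nil => simp [cappedSum]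
  | cons a t ih =>
    simp only [cappedSum, List.map_cons, List.sum_cons] at *
    exact add_le_add (min_le_min le_rfl h) ih

theorem cappedSum_split (c rest : List Int) (u : Int)
    (h1 : ∀ x ∈ c, x ≤ u) (h2 : ∀ x ∈ rest, u ≤ x) :
    cappedSum (c ++ rest) u = c.sum + u * (rest.length : Int) := by
  have hc : (c.map (fun a => min a u)).sum = c.sum := by
    rw [List.map_congr_left (fun x hx => min_eq_left (h1 x hx))]
    simp
  have hr : (rest.map (fun a => min a u)).sum = u * (rest.length : Int) := by
    rw [List.map_congr_left (fun x hx => min_eq_right (h2 x hx))]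
    rw [PySem.List.sum_map_const_int]
    ring
  unfold cappedSum
  rw [List.map_append, List.sum_append, hc, hr]

-- sorted lists: every member is at most the last element
theorem pairwise_le_getLast : ∀ {l : List Int}, l.Pairwise (· ≤ ·) →
    ∀ (h : l ≠ []) (x : Int), x ∈ l → x ≤ l.getLast h := by
  intro l
  induction l with
  | nil => intro _ h; exact absurd rfl h
  | cons a t ih =>
    intro hp h x hx
    rcases List.pairwise_cons.mp hp with ⟨ha, ht⟩
    cases t with
    | nil => simp at hx; simp [hx]
    | cons b t' =>
      rw [List.getLast_cons (by simp)]
      rcases List.mem_cons.mp hx with rfl | hx'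
      · exact le_trans (ha _ (List.getLast_mem _)) le_rfl
      · exact ih ht (by simp) x hx'

-- partial-sum characterisation of the prefix table
def partialSums (s : Int) : List Int → List Int
  | [] => []
  | x :: t => (s + x) :: partialSums (s + x) t

theorem foldPref (l : List Int) : ∀ (acc : List Int) (s : Int),
    (l.foldl (fun (p : List Int × Int) a => (p.1 ++ [p.2 + a], p.2 + a)) (acc, s)).1
      = acc ++ partialSums s l := by
  induction l with
  | nil => intro acc s; simp [partialSums]
  | cons a t ih =>
    intro acc s
    simp only [List.foldl_cons]
    rw [ih]
    simp [partialSums]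

theorem pvPrefixes_eq (l : List Int) : pvPrefixes l = 0 :: partialSums 0 l := by
  unfold pvPrefixes
  rw [foldPref l [0] 0]
  simp

theorem partialSums_getD : ∀ (l : List Int) (s : Int) (j : Nat), j < l.length →
    (partialSums s l).getD j 0 = s + (l.take (j + 1)).sum := by
  intro l
  induction l with
  | nil => intro s j hj; simp at hj
  | cons a t ih =>
    intro s j hj
    cases j with
    | zero => simp [partialSums]
    | succ j' =>
      have hj' : j' < t.length := by simpa using hj
      simp only [partialSums, List.getD_cons_succ]
      rw [ih (s + a) j' hj']
      simp [add_assoc]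

theorem pvPrefixes_getD {l : List Int} {k : Nat} (hk : k ≤ l.length) :
    (pvPrefixes l).getD k 0 = (l.take k).sum := by
  rw [pvPrefixes_eq]
  cases k with
  | zero => simp
  | succ k' =>
    have hk' : k' < l.length := by omega
    simp only [List.getD_cons_succ]
    rw [partialSums_getD l 0 k' hk']
    simp

theorem computeSum_eq {l : List Int} (hs : l.Pairwise (· ≤ ·)) (v : Int) :
    computeSum l v = cappedSum l v := by
  obtain ⟨hk, hlt, hge⟩ := PySem.List.bisectRight_spec l v hs
  set k := PySem.List.bisectRight l v with hkdef
  have hsplit : cappedSum l v = (l.take k).sum + v * ((l.drop k).length : Int) := by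
    conv_lhs => rw [← List.take_append_drop k l]
    refine cappedSum_split _ _ _ ?_ ?_
    · intro x hx
      obtain ⟨j, hj, hjx⟩ := List.mem_take_iff_getElem.mp hx
      exact hjx ▸ hlt j (by omega) (by omega)
    · intro x hx
      obtain ⟨j, hj, hjx⟩ := List.mem_drop_iff_getElem.mp hx
      exact le_of_lt (hjx ▸ hge (k + j) (by omega) (by omega))
  simp only [computeSum]
  rw [PySem.List.pyGetD_natCast, pvPrefixes_getD hk, hsplit]
  simp only [List.length_drop]
  congr 1
  have : ((l.length - k : Nat) : Int) = (l.length : Int) - (k : Int) := by omega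
  rw [this]

theorem scanSeg_char (target : Int) (L : List Int) (hs : L.Pairwise (· ≤ ·))
    (mx : Int) (hmem : mx ∈ L) (hmax : ∀ x ∈ L, x ≤ mx) :
    ∀ (rest c : List Int), L = c ++ rest → (∀ x ∈ c, cappedSum L x < target) →
      GoodR L target (max mx 0) (scanSeg target (max mx 0) rest c.sum) := by
  intro rest
  induction rest with
  | nil =>
    intro c hL hc
    simp only [scanSeg]
    refine ⟨le_max_right _ _, le_rfl, ?_, Or.inr rfl⟩
    intro w hw0 hw
    have hwmx : w < mx := by
      rcases le_total 0 mx with h | h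
      · rwa [max_eq_left h] at hw
      · rw [max_eq_right h] at hw; omega
    have hmono := cappedSum_mono (l := L) hwmx.le
    have hmxc : mx ∈ c := by
      have : L = c := by simpa using hL
      rwa [this] at hmem
    exact lt_of_le_of_lt hmono (hc mx hmxc)
  | cons a t ih =>
    intro c hL hc
    have hpa := hL ▸ hs
    rw [List.pairwise_append] at hpa
    obtain ⟨hpc, hpat, hcross⟩ := hpa
    have hc_le_a : ∀ x ∈ c, x ≤ a := fun x hx => hcross x hx a (by simp)
    have ha_le_t : ∀ x ∈ t, a ≤ x := (List.pairwise_cons.mp hpat).1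
    have ha_mem : a ∈ L := by rw [hL]; simp
    have ha_mx : a ≤ mx := hmax a ha_mem
    have hrempos : (0 : Int) < (t.length : Int) + 1 := by positivity
    simp only [scanSeg]
    by_cases hcr : target ≤ c.sum + a * ((t.length : Int) + 1)
    · rw [if_pos hcr]
      set rem : Int := (t.length : Int) + 1 with hremdef
      set v : Int := -(PySem.Int.floordiv (c.sum - target) rem) with hv
      have hbr : (v - 1) * rem < target - c.sum ∧ target - c.sum ≤ v * rem := by
        refine (PySem.Int.neg_floordiv_neg_eq_iff_of_pos
          (a := target - c.sum) (b := rem) (q := v) hrempos).mp ?_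
        rw [hv]
        congr 2
        ring
      obtain ⟨hbr1, hbr2⟩ := hbr
      have hva : v ≤ a := by
        have h1 : (v - 1) * rem < a * rem := lt_of_lt_of_le hbr1 (by linarith)
        have := lt_of_mul_lt_mul_right h1 hrempos.le
        omega
      have hcv : ∀ x ∈ c, x < v := by
        intro x hx
        have hcne : c ≠ [] := List.ne_nil_of_mem hx
        obtain ⟨m, hm⟩ : ∃ m, PySem.List.max? c (fun y => y) = some m := by
          cases h : PySem.List.max? c (fun y => y) with
          | none => exact absurd ((PySem.List.max?_eq_none_iff c _).mp h) hcne
          | some m => exact ⟨m, rfl⟩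
        have hmmem := PySem.List.max?_mem hm
        have hmmax := PySem.List.max?_isMax hm
        have hsm : cappedSum L m = c.sum + m * rem := by
          rw [hL]
          have := cappedSum_split c (a :: t) m (fun y hy => hmmax y hy)
            (fun y hy => by
              rcases List.mem_cons.mp hy with rfl | hy'
              · exact hc_le_a m hmmem
              · exact le_trans (hc_le_a m hmmem) (ha_le_t y hy'))
          rw [this]
          simp [hremdef]
        have hlt := hc m hmmem
        rw [hsm] at hlt
        have hmv : m < v := by
          have h1 : m * rem < v * rem := by linarith
          exact lt_of_mul_lt_mul_right h1 hrempos.le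
        exact lt_of_le_of_lt (hmmax x hx) hmv
      have hsplitAt : ∀ u : Int, (∀ x ∈ c, x ≤ u) → u ≤ a →
          cappedSum L u = c.sum + u * rem := by
        intro u hu1 hu2
        rw [hL]
        have := cappedSum_split c (a :: t) u hu1
          (fun y hy => by
            rcases List.mem_cons.mp hy with rfl | hy'
            · exact hu2
            · exact le_trans hu2 (ha_le_t y hy'))
        rw [this]
        simp [hremdef]
      have hSv : cappedSum L v = c.sum + v * rem :=
        hsplitAt v (fun x hx => (hcv x hx).le) hva
      have hSvt : target ≤ cappedSum L v := by rw [hSv]; linarith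
      refine ⟨le_max_right _ _, max_le_max (le_trans hva ha_mx) le_rfl, ?_, ?_⟩
      · intro w hw0 hw
        have hvpos : 0 < v := by
          rcases le_total v 0 with h | h
          · rw [max_eq_right h] at hw; omega
          · rcases h.lt_or_eq with h' | h'
            · exact h'
            · rw [← h', max_eq_right le_rfl] at hw; omega
        rw [max_eq_left hvpos.le] at hw
        have hSv1 : cappedSum L (v - 1) = c.sum + (v - 1) * rem :=
          hsplitAt (v - 1) (fun x hx => by have := hcv x hx; omega) (by omega)
        calc cappedSum L w ≤ cappedSum L (v - 1) := cappedSum_mono (by omega)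
          _ < target := by rw [hSv1]; linarith
      · exact Or.inl (le_trans hSvt (cappedSum_mono (le_max_left v 0)))
    · rw [if_neg hcr]
      have hSa : cappedSum L a = c.sum + a * ((t.length : Int) + 1) := by
        rw [hL]
        have := cappedSum_split c (a :: t) a hc_le_a
          (fun y hy => by
            rcases List.mem_cons.mp hy with rfl | hy'
            · exact le_rfl
            · exact ha_le_t y hy')
        rw [this]
        simp
      have hrec := ih (c ++ [a]) (by rw [hL]; simp) (by
        intro x hx
        rcases List.mem_append.mp hx with hx' | hx'
        · exact hc x hx'
        · simp at hx'
          subst hx'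
          rw [hSa]
          omega)
      simpa using hrec

theorem bsearchA_char (l : List Int) (target mx : Int) :
    ∀ (fuel : Nat) (lo hi : Int), (hi - lo).toNat ≤ fuel → 0 ≤ lo → lo ≤ hi → hi ≤ mx →
      (∀ w, 0 ≤ w → w < lo → cappedSum l w < target) →
      (target ≤ cappedSum l hi ∨ hi = mx) →
      GoodR l target mx (bsearchA (cappedSum l) target fuel lo hi) := by
  intro fuel
  induction fuel with
  | zero =>
    intro lo hi hf h0 hlh hhm hlow hup
    have hlo : lo = hi := by omega
    simp only [bsearchA]
    exact ⟨h0, by omega, hlow, by rw [hlo]; exact hup⟩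
  | succ f ihf =>
    intro lo hi hf h0 hlh hhm hlow hup
    by_cases h : lo < hi
    · have hb := PySem.Int.floordiv_two_mid_bounds (le_of_lt h)
      have hmidlt : PySem.Int.floordiv (lo + hi) 2 < hi := by
        rw [PySem.Int.floordiv_lt_iff_lt_mul (by norm_num)]; omega
      rw [bsearchA, if_pos h]
      by_cases hcs : cappedSum l (PySem.Int.floordiv (lo + hi) 2) < target
      · rw [if_pos hcs]
        refine ihf _ hi (by omega) (by omega) (by omega) hhm ?_ hup
        intro w hw0 hw
        exact lt_of_le_of_lt (cappedSum_mono (by omega)) hcs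
      · rw [if_neg hcs]
        exact ihf lo _ (by omega) h0 (by omega) (by omega) hlow
          (Or.inl (not_lt.mp hcs))
    · rw [bsearchA, if_neg h]
      have hlo : lo = hi := by omega
      exact ⟨h0, by omega, hlow, by rw [hlo]; exact hup⟩

-- ===== VERDICT (by name: the statement is the Claim_ definition above) =====
theorem findBestValue_spec : Claim_equal_findBestValue := by
  intro arr target _ hpre
  unfold Spec_findBestValue
  simp only [findBestValue, findBestValue_alt]
  set l := PySem.List.sorted arr (fun y => y) with hl
  have hs : l.Pairwise (· ≤ ·) := PySem.List.sorted_pairwise arr (fun y => y)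
  have hlne : l ≠ [] := by
    intro h
    have hperm := PySem.List.sorted_perm arr (fun y => y) false
    rw [hl] at h
    rw [h] at hperm
    exact hpre hperm.nil_eq.symm
  obtain ⟨m, hm⟩ : ∃ m, PySem.List.max? l (fun y => y) = some m := by
    cases h : PySem.List.max? l (fun y => y) with
    | none => exact absurd ((PySem.List.max?_eq_none_iff l _).mp h) hlne
    | some m => exact ⟨m, rfl⟩
  have hmmem : m ∈ l := PySem.List.max?_mem hm
  have hmmax : ∀ x ∈ l, x ≤ m := PySem.List.max?_isMax hm
  have hlast : PySem.List.pyGet? l (-1) = some (l.getLast hlne) := by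
    rw [PySem.List.pyGet?_neg_one]
    exact List.getLast?_eq_some_getLast hlne
  have hlastm : l.getLast hlne = m :=
    le_antisymm (hmmax _ (List.getLast_mem hlne)) (pairwise_le_getLast hs hlne m hmmem)
  rw [hm, hlast, hlastm]
  simp only [Option.getD_some]
  have hcseq : computeSum l = cappedSum l := funext (computeSum_eq hs)
  have hB : GoodR l target (max m 0) (scanSeg target (max m 0) l 0) := by
    have := scanSeg_char target l hs m hmmem hmmax l [] rfl (by simp)
    simpa using this
  by_cases hm0 : 0 ≤ m
  · rw [max_eq_left hm0] at hB
    have hA : GoodR l target m (bsearchA (computeSum l) target (m - 0).toNat 0 m) := by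
      rw [hcseq]
      refine bsearchA_char l target m (m - 0).toNat 0 m (by omega) le_rfl hm0 le_rfl ?_ (Or.inr rfl)
      intro w hw0 hw
      omega
    have heq : bsearchA (computeSum l) target (m - 0).toNat 0 m = scanSeg target (max m 0) l 0 := by
      rw [max_eq_left hm0]
      exact goodR_unique hA hB
    rw [heq, hcseq]
  · rw [not_le] at hm0
    have hA0 : bsearchA (computeSum l) target (m - 0).toNat 0 m = 0 := by
      have : (m - 0).toNat = 0 := by omega
      rw [this, bsearchA]
    have hB0 : scanSeg target (max m 0) l 0 = 0 := by
      obtain ⟨h1, h2, _, _⟩ := hB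
      have : max m 0 = 0 := max_eq_right hm0.le
      omega
    rw [hA0, hB0]
    norm_num
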